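-- pv_equiv track=rewrite | github.com/MoigeMatino/data-structures-algorithms-python | graphs/semesters_required/semesters_required.py | get_semesters_required
-- ===== SOURCE A (Python) =====
-- def get_semesters_required(course, graph, no_of_semesters):
--     # If semesters required for this course is already calculated, return it
--     if course in no_of_semesters:
--         return no_of_semesters[course]
--
--     maximum = 0
--     # Traverse through the prerequisite courses
--     for neighbor_course in graph[course]:
--         # Recursively calculate the semesters required for each prerequisite course
--         temp_max = get_semesters_required(neighbor_course, graph, no_of_semesters)
--         # Update the maximum semesters required among all prerequisites
--         if temp_max > maximum:
--             maximum = temp_max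
--
--     # Store the semesters required for the current course
--     no_of_semesters[course] = 1 + maximum
--
--     return no_of_semesters[course]
-- ===== SOURCE B (Python) =====
-- def get_semesters_required(course, graph, no_of_semesters):
--     # Bottom-up fixpoint: repeatedly resolve every course whose prerequisites
--     # are all resolved, instead of recursing; does not mutate the memo argument.
--     depths = dict(no_of_semesters)
--     for _ in range(len(graph) + 1):
--         for c, prereqs in graph.items():
--             if c in depths:
--                 continue
--             if all(p in depths for p in prereqs):
--                 depths[c] = 1 + max([0] + [depths[p] for p in prereqs])
--     return depths[course]
-- ===== Notes on version B (the rewrite author's own statement) =====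
-- stated objective: alternative
-- what changed: Replaces A's memoized depth-first recursion (which mutates the shared memo dict) with a non-recursive bottom-up fixpoint: len(graph)+1 relaxation rounds that resolve every course whose prerequisites are all resolved, then a single lookup of the queried course.
import Mathlib
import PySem

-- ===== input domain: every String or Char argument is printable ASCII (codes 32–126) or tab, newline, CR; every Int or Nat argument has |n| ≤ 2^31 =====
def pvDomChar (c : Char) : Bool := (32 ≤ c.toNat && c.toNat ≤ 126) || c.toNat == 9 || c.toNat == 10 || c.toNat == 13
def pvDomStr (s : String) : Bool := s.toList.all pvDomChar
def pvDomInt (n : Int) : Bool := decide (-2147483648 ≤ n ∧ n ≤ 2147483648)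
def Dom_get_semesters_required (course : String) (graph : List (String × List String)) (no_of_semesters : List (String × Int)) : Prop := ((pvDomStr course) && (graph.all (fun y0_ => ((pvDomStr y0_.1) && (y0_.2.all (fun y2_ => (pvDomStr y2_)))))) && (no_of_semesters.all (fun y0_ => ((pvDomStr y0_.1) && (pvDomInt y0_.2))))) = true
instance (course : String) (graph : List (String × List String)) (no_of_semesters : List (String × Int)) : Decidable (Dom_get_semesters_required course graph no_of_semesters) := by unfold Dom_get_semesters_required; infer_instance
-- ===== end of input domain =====

-- B replaces A's memoized depth-first recursion by a non-recursive bottom-up fixpoint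
-- (len(graph)+1 relaxation rounds); equivalence is about the RETURN value only: A mutates
-- the no_of_semesters dict in place, B does not.

-- ===== PORT A =====
-- A is a memoized recursion; the Nat argument is a fuel guard making the recursion total
-- (it never runs out on inputs satisfying Pre_, where A's recursion terminates).
mutual
def gsGoA (graph : List (String × List String)) (f : Nat) (c : String) (m : PySem.Dict String Int) : Int × PySem.Dict String Int :=
  match m.get? c with
  | some v => (v, m)                               -- if course in no_of_semesters: return it
  | none =>
    match f with
    | 0 => (0, m)                                  -- fuel guard (unreachable under Pre_)
    | f' + 1 =>
      match (PySem.Dict.mk graph).get? c with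
      | none => (0, m)                             -- graph[course]: KeyError (excluded by Pre_)
      | some ns =>
        let p := gsGoAList graph f' ns 0 m         -- the for-loop over prerequisites
        (1 + p.1, p.2.insert c (1 + p.1))          -- no_of_semesters[course] = 1 + maximum
termination_by (f, 0)

def gsGoAList (graph : List (String × List String)) (f : Nat) (ns : List String) (mx : Int) (m : PySem.Dict String Int) : Int × PySem.Dict String Int :=
  match ns with
  | [] => (mx, m)
  | n :: rest =>
    let r := gsGoA graph f n m                     -- temp_max = get_semesters_required(...)
    gsGoAList graph f rest (if mx < r.1 then r.1 else mx) r.2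
termination_by (f, ns.length + 1)
end

def get_semesters_required (course : String) (graph : List (String × List String)) (no_of_semesters : List (String × Int)) : Int :=
  (gsGoA graph (graph.length + 1) course (PySem.Dict.mk no_of_semesters)).1

-- ===== PORT B =====
-- one item of the inner loop: resolve a course whose prerequisites are all resolved
def gsBStep (d : PySem.Dict String Int) (p : String × List String) : PySem.Dict String Int :=
  if d.contains p.1 then d
  else if p.2.all (fun n => d.contains n) then
    d.insert p.1 (1 + (p.2.map (fun n => d.getD n 0)).foldl max 0)
  else d

-- one round: for c, prereqs in graph.items()
def gsBRound (graph : List (String × List String)) (d : PySem.Dict String Int) : PySem.Dict String Int :=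
  graph.foldl gsBStep d

def get_semesters_required_alt (course : String) (graph : List (String × List String)) (no_of_semesters : List (String × Int)) : Int :=
  let d := (List.range (graph.length + 1)).foldl (fun d _ => gsBRound graph d) (PySem.Dict.mk no_of_semesters)
  d.getD course 0                                  -- return depths[course] (KeyError excluded by Pre_)

-- ===== PRECONDITION & SPEC =====
-- neighbours the recursion of A actually follows: memoised courses are cut off
def gsSuccs (graph : List (String × List String)) (m0 : List (String × Int)) (c : String) : List String :=
  if (PySem.Dict.mk m0).contains c then [] else ((PySem.Dict.mk graph).get? c).getD []

def gsStep (graph : List (String × List String)) (m0 : List (String × Int)) (s : List String) : List String :=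
  PySem.List.dedup (s ++ s.flatMap (gsSuccs graph m0))

-- courses reachable from s in at most n steps (saturates: any reachable course is
-- reachable by a repetition-free walk of at most graph.length steps)
def gsRClos (graph : List (String × List String)) (m0 : List (String × Int)) : Nat → List String → List String
  | 0, s => s
  | n + 1, s => gsRClos graph m0 n (gsStep graph m0 s)

-- Pre_: exactly the inputs on which the Python A returns normally: dict arguments have no
-- duplicate keys (a Python dict cannot), every course reachable from the query is memoised
-- or present in the graph (else A raises KeyError), and the reachable part of the graph is
-- acyclic (else A's recursion never terminates / raises RecursionError).
def Pre_get_semesters_required (course : String) (graph : List (String × List String)) (no_of_semesters : List (String × Int)) : Prop :=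
  (graph.map (·.1)).Nodup ∧ (no_of_semesters.map (·.1)).Nodup ∧
  (∀ x ∈ gsRClos graph no_of_semesters (graph.length + 1) [course],
      (PySem.Dict.mk no_of_semesters).contains x = true ∨ (PySem.Dict.mk graph).contains x = true) ∧
  (∀ x ∈ gsRClos graph no_of_semesters (graph.length + 1) [course],
      x ∉ gsRClos graph no_of_semesters (graph.length + 1) (gsSuccs graph no_of_semesters x))

instance (course : String) (graph : List (String × List String)) (no_of_semesters : List (String × Int)) : Decidable (Pre_get_semesters_required course graph no_of_semesters) := by
  unfold Pre_get_semesters_required; infer_instance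

def pvWitness_get_semesters_required : String × (List (String × List String)) × (List (String × Int)) :=
  ("algo", [("algo", ["math", "intro"]), ("math", ["intro"]), ("intro", [])], [("intro", 2)])

def Spec_get_semesters_required (course : String) (graph : List (String × List String)) (no_of_semesters : List (String × Int)) (out : Int) : Prop := out = get_semesters_required_alt course graph no_of_semesters
instance (course : String) (graph : List (String × List String)) (no_of_semesters : List (String × Int)) (out : Int) : Decidable (Spec_get_semesters_required course graph no_of_semesters out) := by unfold Spec_get_semesters_required; infer_instance

-- ===== CLAIM (what is proved, stated in full; the proofs are below) =====
def Claim_equal_get_semesters_required : Prop := ∀ (course : String) (graph : List (String × List String)) (no_of_semesters : List (String × Int)), Dom_get_semesters_required course graph no_of_semesters → Pre_get_semesters_required course graph no_of_semesters → Spec_get_semesters_required course graph no_of_semesters (get_semesters_required course graph no_of_semesters)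

-- ===== LEMMAS AND PROOFS =====

-- the edge relation A's recursion follows
def gsE (graph : List (String × List String)) (m0 : List (String × Int)) (c d : String) : Prop :=
  d ∈ gsSuccs graph m0 c

-- pure specification value: the depth A computes, without the memo threading
mutual
def gsSv (graph : List (String × List String)) (m0 : List (String × Int)) (f : Nat) (c : String) : Int :=
  match (PySem.Dict.mk m0).get? c with
  | some v => v
  | none =>
    match f with
    | 0 => 0
    | f' + 1 =>
      match (PySem.Dict.mk graph).get? c with
      | none => 0
      | some ns => 1 + gsSvList graph m0 f' ns 0
termination_by (f, 0)

def gsSvList (graph : List (String × List String)) (m0 : List (String × Int)) (f : Nat) (ns : List String) (mx : Int) : Int :=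
  match ns with
  | [] => mx
  | n :: rest =>
    let t := gsSv graph m0 f n
    gsSvList graph m0 f rest (if mx < t then t else mx)
termination_by (f, ns.length + 1)
end

def gsVal (graph : List (String × List String)) (m0 : List (String × Int)) (c : String) : Int :=
  gsSv graph m0 (graph.length + 1) c

-- every gsE-chain from c has fewer than f steps
def gsHb (graph : List (String × List String)) (m0 : List (String × Int)) (f : Nat) (c : String) : Prop :=
  ∀ l, List.IsChain (gsE graph m0) (c :: l) → l.length < f

-- reachable from the queried course along gsE
def gsReach (course : String) (graph : List (String × List String)) (m0 : List (String × Int)) (c : String) : Prop :=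
  c = course ∨ ∃ p, List.IsChain (gsE graph m0) (course :: (p ++ [c]))

theorem gs_reach_chain {course : String} {graph : List (String × List String)} {m0 : List (String × Int)} {c d : String}
    (hr : gsReach course graph m0 c) (he : gsE graph m0 c d) :
    ∃ p, List.IsChain (gsE graph m0) (course :: (p ++ [d])) := by
  rcases hr with rfl | ⟨p, hch⟩
  · refine ⟨[], ?_⟩
    simp only [List.nil_append]
    exact List.isChain_cons_cons.mpr ⟨he, by simp⟩
  · refine ⟨p ++ [c], ?_⟩
    have happ : List.IsChain (gsE graph m0) ((course :: (p ++ [c])) ++ [d]) := by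
      refine List.IsChain.append hch (by simp) ?_
      intro a ha y hy
      simp only [List.head?_cons, Option.mem_some_iff] at hy
      subst hy
      have ha' : a = c := by
        rw [show course :: (p ++ [c]) = (course :: p) ++ [c] by simp, List.getLast?_concat] at ha
        simpa using ha.symm
      subst ha'
      exact he
    simpa using happ

theorem gs_mem_step {graph : List (String × List String)} {m0 : List (String × Int)} {s : List String} {y : String} :
    y ∈ gsStep graph m0 s ↔ y ∈ s ∨ ∃ c ∈ s, y ∈ gsSuccs graph m0 c := by
  simp [gsStep, List.mem_append, List.mem_flatMap]

theorem gs_subset_step {graph : List (String × List String)} {m0 : List (String × Int)} {s : List String} :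
    s ⊆ gsStep graph m0 s := by
  intro y hy; exact gs_mem_step.mpr (Or.inl hy)

theorem gs_subset_rclos {graph : List (String × List String)} {m0 : List (String × Int)} (n : Nat) {s : List String} :
    s ⊆ gsRClos graph m0 n s := by
  induction n generalizing s with
  | zero => simp [gsRClos]
  | succ n ih =>
    simp only [gsRClos]
    exact fun y hy => ih (gs_subset_step hy)

theorem gs_chainMem {graph : List (String × List String)} {m0 : List (String × Int)} :
    ∀ (l : List String) (c : String) (n : Nat) (s : List String), c ∈ s →
      List.IsChain (gsE graph m0) (c :: l) → l.length ≤ n →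
      ∀ y ∈ c :: l, y ∈ gsRClos graph m0 n s := by
  intro l
  induction l with
  | nil =>
    intro c n s hc _ _ y hy
    simp only [List.mem_singleton] at hy
    subst hy
    exact gs_subset_rclos n hc
  | cons d l' ih =>
    intro c n s hc hch hlen y hy
    obtain ⟨n', rfl⟩ : ∃ n', n = n' + 1 := by
      cases n with
      | zero => simp at hlen
      | succ k => exact ⟨k, rfl⟩
    rw [List.isChain_cons_cons] at hch
    have hd : d ∈ gsStep graph m0 s := gs_mem_step.mpr (Or.inr ⟨c, hc, hch.1⟩)
    simp only [gsRClos]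
    rcases List.mem_cons.mp hy with rfl | hy'
    · exact gs_subset_rclos n' (gs_subset_step hc)
    · exact ih d n' (gsStep graph m0 s) hd hch.2 (by simpa using hlen) y hy'

theorem gs_src_mem_keys {graph : List (String × List String)} {m0 : List (String × Int)} {c d : String}
    (h : gsE graph m0 c d) : c ∈ graph.map (·.1) := by
  unfold gsE gsSuccs at h
  split at h
  · simp at h
  · match hg : (PySem.Dict.mk graph).get? c with
    | none => rw [hg] at h; simp at h
    | some ns =>
      have : c ∈ (PySem.Dict.mk graph).keys := by
        by_contra hk
        rw [(PySem.Dict.get?_eq_none_iff_not_mem_keys _ c).mpr hk] at hg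
        cases hg
      simpa [PySem.Dict.keys] using this

theorem gs_sources_keys {graph : List (String × List String)} {m0 : List (String × Int)} :
    ∀ l : List String, List.IsChain (gsE graph m0) l → ∀ x ∈ l.dropLast, x ∈ graph.map (·.1) := by
  intro l
  induction l with
  | nil => simp
  | cons a t ih =>
    intro hch x hx
    cases t with
    | nil => simp at hx
    | cons b t' =>
      rw [List.isChain_cons_cons] at hch
      rw [List.dropLast_cons₂, List.mem_cons] at hx
      rcases hx with rfl | hx'
      · exact gs_src_mem_keys hch.1
      · exact ih hch.2 x hx'

theorem gs_not_nodup_split {α : Type} (l : List α) (h : ¬ l.Nodup) :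
    ∃ p x q r, l = p ++ x :: q ++ x :: r := by
  induction l with
  | nil => simp at h
  | cons a t ih =>
    rw [List.nodup_cons] at h
    by_cases ha : a ∈ t
    · obtain ⟨q, r, rfl⟩ := List.append_of_mem ha
      exact ⟨[], a, q, r, rfl⟩
    · obtain ⟨p, x, q, r, rfl⟩ := ih (fun hn => h ⟨ha, hn⟩)
      exact ⟨a :: p, x, q, r, rfl⟩

-- the pigeonhole bound: under Pre_, chains out of the queried course are short
theorem gs_chains_short {course : String} {graph : List (String × List String)} {m0 : List (String × Int)}
    (pre : Pre_get_semesters_required course graph m0) :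
    ∀ l, List.IsChain (gsE graph m0) (course :: l) → l.length ≤ graph.length := by
  intro l hch
  by_contra hlen
  push Not at hlen
  obtain ⟨pre1, _, _, pre4⟩ := pre
  set K := graph.length with hK
  have hpref : (course :: l.take (K + 1)) <+: (course :: l) :=
    (List.cons_prefix_cons).mpr ⟨rfl, List.take_prefix _ _⟩
  have hch' : List.IsChain (gsE graph m0) (course :: l.take (K + 1)) := hch.prefix hpref
  set vs := course :: l.take (K + 1) with hvsdef
  have hvslen : vs.length = K + 2 := by
    simp only [hvsdef, List.length_cons, List.length_take]
    omega
  have hvs_ne : vs ≠ [] := by simp [hvsdef]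
  have hsrclen : vs.dropLast.length = K + 1 := by
    rw [List.length_dropLast, hvslen]
    omega
  have hsub : ∀ x ∈ vs.dropLast, x ∈ graph.map (·.1) := gs_sources_keys vs hch'
  have hnodup : ¬ vs.dropLast.Nodup := by
    intro hnd
    have hle : vs.dropLast.length ≤ (graph.map (·.1)).length := by
      calc vs.dropLast.length = vs.dropLast.toFinset.card := (List.toFinset_card_of_nodup hnd).symm
        _ ≤ (graph.map (·.1)).toFinset.card := Finset.card_le_card (fun x hx => by
              simp only [List.mem_toFinset] at *
              exact hsub x hx)
        _ ≤ (graph.map (·.1)).length := List.toFinset_card_le _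
    rw [hsrclen, List.length_map] at hle
    omega
  obtain ⟨p, x, q, r, hsplit⟩ := gs_not_nodup_split vs.dropLast hnodup
  have hvs0 : vs = p ++ x :: q ++ x :: (r ++ [vs.getLast hvs_ne]) := by
    conv_lhs => rw [← List.dropLast_append_getLast hvs_ne]
    rw [hsplit]
    simp
  obtain ⟨lastv, hvs⟩ : ∃ lv, vs = p ++ x :: q ++ x :: (r ++ [lv]) := ⟨vs.getLast hvs_ne, hvs0⟩
  have hlens : p.length + q.length + r.length + 3 = K + 2 := by
    have := congrArg List.length hvs
    rw [hvslen] at this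
    simp at this
    omega
  -- x is reachable from course
  have hxR : x ∈ gsRClos graph m0 (K + 1) [course] := by
    cases p with
    | nil =>
      have hx : course = x := by
        have := congrArg List.head? hvs
        simp [hvsdef] at this
        exact this
      rw [← hx]
      exact gs_subset_rclos _ (by simp)
    | cons c0 p' =>
      have hc0 : course = c0 := by
        have := congrArg List.head? hvs
        simp [hvsdef] at this
        exact this
      subst hc0
      have hpref2 : (course :: (p' ++ [x])) <+: vs := by
        refine ⟨q ++ x :: (r ++ [lastv]), ?_⟩
        rw [hvs]
        simp
      have hch2 : List.IsChain (gsE graph m0) (course :: (p' ++ [x])) := hch'.prefix hpref2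
      refine gs_chainMem (p' ++ [x]) course (K + 1) [course] (by simp) hch2 ?_ x (by simp)
      simp at hlens ⊢
      omega
  -- x lies on a cycle: x is reachable from its own successors
  have hxC : x ∈ gsRClos graph m0 (K + 1) (gsSuccs graph m0 x) := by
    have hsuf : (x :: q ++ x :: (r ++ [lastv])) <:+ vs := ⟨p, by rw [hvs]; simp⟩
    have hch2 : List.IsChain (gsE graph m0) (x :: q ++ x :: (r ++ [lastv])) :=
      hch'.suffix hsuf
    have hpref3 : (x :: (q ++ [x])) <+: (x :: q ++ x :: (r ++ [lastv])) := by
      refine (List.cons_prefix_cons).mpr ⟨rfl, ⟨r ++ [lastv], by simp⟩⟩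
    have hch3 : List.IsChain (gsE graph m0) (x :: (q ++ [x])) := hch2.prefix hpref3
    cases q with
    | nil =>
      have hxx : gsE graph m0 x x := (List.isChain_cons_cons.mp hch3).1
      exact gs_subset_rclos _ hxx
    | cons h0 q' =>
      rw [List.cons_append, List.isChain_cons_cons] at hch3
      refine gs_chainMem (q' ++ [x]) h0 (K + 1) (gsSuccs graph m0 x) hch3.1 hch3.2 ?_ x (by simp)
      simp at hlens ⊢
      omega
  exact pre4 x hxR hxC

theorem gs_reach_step {course : String} {graph : List (String × List String)} {m0 : List (String × Int)} {c d : String}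
    (hr : gsReach course graph m0 c) (he : gsE graph m0 c d) : gsReach course graph m0 d := by
  obtain ⟨p, hch⟩ := gs_reach_chain hr he
  exact Or.inr ⟨p, hch⟩

theorem gs_reach_hb {course : String} {graph : List (String × List String)} {m0 : List (String × Int)}
    (pre : Pre_get_semesters_required course graph m0) {c : String} (hr : gsReach course graph m0 c) :
    gsHb graph m0 (graph.length + 1) c := by
  intro l hch
  rcases hr with rfl | ⟨p, hchp⟩
  · have := gs_chains_short pre l hch
    omega
  · have happ : List.IsChain (gsE graph m0) ((course :: (p ++ [c])) ++ l) := by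
      refine List.IsChain.append hchp (List.isChain_cons.mp hch).2 ?_
      intro a ha y hy
      have ha' : a = c := by
        rw [show course :: (p ++ [c]) = (course :: p) ++ [c] by simp, List.getLast?_concat] at ha
        simpa using ha.symm
      subst ha'
      exact (List.isChain_cons.mp hch).1 y hy
    have := gs_chains_short pre (p ++ [c] ++ l) (by simpa using happ)
    simp at this
    omega

theorem gs_reach_hb_succ {course : String} {graph : List (String × List String)} {m0 : List (String × Int)}
    (pre : Pre_get_semesters_required course graph m0) {c d : String} (hr : gsReach course graph m0 c)
    (he : gsE graph m0 c d) : gsHb graph m0 graph.length d := by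
  obtain ⟨p, hchp⟩ := gs_reach_chain hr he
  intro l hch
  have happ : List.IsChain (gsE graph m0) ((course :: (p ++ [d])) ++ l) := by
    refine List.IsChain.append hchp (List.isChain_cons.mp hch).2 ?_
    intro a ha y hy
    have ha' : a = d := by
      rw [show course :: (p ++ [d]) = (course :: p) ++ [d] by simp, List.getLast?_concat] at ha
      simpa using ha.symm
    subst ha'
    exact (List.isChain_cons.mp hch).1 y hy
  have := gs_chains_short pre (p ++ [d] ++ l) (by simpa using happ)
  simp at this
  omega

theorem gs_reach_mem_rclos {course : String} {graph : List (String × List String)} {m0 : List (String × Int)}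
    (pre : Pre_get_semesters_required course graph m0) {c : String} (hr : gsReach course graph m0 c) :
    c ∈ gsRClos graph m0 (graph.length + 1) [course] := by
  rcases hr with rfl | ⟨p, hch⟩
  · exact gs_subset_rclos _ (by simp)
  · refine gs_chainMem (p ++ [c]) course (graph.length + 1) [course] (by simp) hch ?_ c (by simp)
    have := gs_chains_short pre (p ++ [c]) hch
    simp at this ⊢
    omega

theorem gs_svList_congr {graph : List (String × List String)} {m0 : List (String × Int)} {f₁ f₂ : Nat} :
    ∀ (ns : List String) (mx : Int), (∀ n ∈ ns, gsSv graph m0 f₁ n = gsSv graph m0 f₂ n) →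
      gsSvList graph m0 f₁ ns mx = gsSvList graph m0 f₂ ns mx := by
  intro ns
  induction ns with
  | nil => intro mx _; simp [gsSvList]
  | cons n rest ih =>
    intro mx h
    simp only [gsSvList]
    rw [h n (by simp)]
    exact ih _ (fun n' hn' => h n' (by simp [hn']))

theorem gs_sv_stable {graph : List (String × List String)} {m0 : List (String × Int)} :
    ∀ (f₁ f₂ : Nat) (c : String), gsHb graph m0 f₁ c → f₁ ≤ f₂ →
      gsSv graph m0 f₁ c = gsSv graph m0 f₂ c := by
  intro f₁
  induction f₁ with
  | zero =>
    intro f₂ c hb _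
    exact absurd (hb [] (by simp)) (by omega)
  | succ f' ih =>
    intro f₂ c hb hle
    obtain ⟨f₂', rfl⟩ : ∃ k, f₂ = k + 1 := ⟨f₂ - 1, by omega⟩
    cases hm : (PySem.Dict.mk m0).get? c with
    | some v => simp only [gsSv, hm]
    | none =>
      cases hg : (PySem.Dict.mk graph).get? c with
      | none => simp only [gsSv, hm, hg]
      | some ns =>
        simp only [gsSv, hm, hg]
        have hnext : ∀ n ∈ ns, gsSv graph m0 f' n = gsSv graph m0 f₂' n := by
          intro n hn
          refine ih f₂' n ?_ (by omega)
          intro l hl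
          have hcn : gsE graph m0 c n := by
            unfold gsE gsSuccs
            rw [if_neg (by simp [(PySem.Dict.get?_eq_none_iff_contains _ c).mp hm]), hg]
            simpa using hn
          have := hb (n :: l) (List.isChain_cons_cons.mpr ⟨hcn, hl⟩)
          simp at this
          omega
        rw [gs_svList_congr ns 0 hnext]

theorem gs_sv_memo {graph : List (String × List String)} {m0 : List (String × Int)} {c : String} {v : Int}
    (h : (PySem.Dict.mk m0).get? c = some v) (f : Nat) : gsSv graph m0 f c = v := by
  cases f <;> simp only [gsSv, h]

theorem gs_sv_succ {graph : List (String × List String)} {m0 : List (String × Int)} {c : String}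
    (h : (PySem.Dict.mk m0).get? c = none) (f : Nat) :
    gsSv graph m0 (f + 1) c =
      match (PySem.Dict.mk graph).get? c with
      | none => 0
      | some ns => 1 + gsSvList graph m0 f ns 0 := by
  simp only [gsSv, h]

theorem gs_max_if (a b : Int) : max a b = if a < b then b else a := by
  rcases lt_or_ge a b with h | h
  · rw [if_pos h, max_eq_right h.le]
  · rw [if_neg (not_lt.mpr h), max_eq_left h]

-- invariant for A's threaded memo dict
def gsInv (graph : List (String × List String)) (m0 : List (String × Int)) (d : PySem.Dict String Int) : Prop :=
  d.keys.Nodup ∧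
  (∀ x v, (PySem.Dict.mk m0).get? x = some v → d.get? x = some v) ∧
  (∀ x v, (PySem.Dict.mk m0).get? x = none → d.get? x = some v → v = gsVal graph m0 x)

theorem gs_A_main {course : String} {graph : List (String × List String)} {m0 : List (String × Int)}
    (pre : Pre_get_semesters_required course graph m0) :
    ∀ (f : Nat) (c : String) (d : PySem.Dict String Int), gsInv graph m0 d → gsReach course graph m0 c →
      gsHb graph m0 f c →
      (gsGoA graph f c d).1 = gsVal graph m0 c ∧ gsInv graph m0 (gsGoA graph f c d).2 := by
  have hmemo : ∀ (c : String) (d : PySem.Dict String Int) (v : Int), gsInv graph m0 d →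
      d.get? c = some v → v = gsVal graph m0 c := by
    intro c d v hinv hd
    cases hm : (PySem.Dict.mk m0).get? c with
    | some w =>
      have := hinv.2.1 c w hm
      rw [hd] at this
      cases this
      exact (gs_sv_memo hm _).symm
    | none => exact hinv.2.2 c v hm hd
  intro f
  induction f with
  | zero =>
    intro c d hinv hr hb
    cases hd : d.get? c with
    | some v =>
      have h1 : gsGoA graph 0 c d = (v, d) := by simp only [gsGoA, hd]
      rw [h1]
      exact ⟨hmemo c d v hinv hd, hinv⟩
    | none => exact absurd (hb [] (by simp)) (by omega)
  | succ f' ih =>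
    intro c d hinv hr hb
    cases hd : d.get? c with
    | some v =>
      have h1 : gsGoA graph (f' + 1) c d = (v, d) := by simp only [gsGoA, hd]
      rw [h1]
      exact ⟨hmemo c d v hinv hd, hinv⟩
    | none =>
      have hm0 : (PySem.Dict.mk m0).get? c = none := by
        cases hm : (PySem.Dict.mk m0).get? c with
        | none => rfl
        | some w =>
          have := hinv.2.1 c w hm
          rw [hd] at this
          cases this
      cases hg : (PySem.Dict.mk graph).get? c with
      | none =>
        have h1 : gsGoA graph (f' + 1) c d = (0, d) := by simp only [gsGoA, hd, hg]
        rw [h1]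
        refine ⟨?_, hinv⟩
        rw [gsVal, gs_sv_succ hm0, hg]
      | some ns =>
        have hEn : ∀ n ∈ ns, gsE graph m0 c n := by
          intro n hn
          unfold gsE gsSuccs
          rw [if_neg (by simp [(PySem.Dict.get?_eq_none_iff_contains _ c).mp hm0]), hg]
          simpa using hn
        have hns : ∀ n ∈ ns, gsReach course graph m0 n ∧ gsHb graph m0 f' n ∧ gsHb graph m0 graph.length n := by
          intro n hn
          refine ⟨gs_reach_step hr (hEn n hn), ?_, gs_reach_hb_succ pre hr (hEn n hn)⟩
          intro l hl
          have := hb (n :: l) (List.isChain_cons_cons.mpr ⟨hEn n hn, hl⟩)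
          simp at this
          omega
        have hlist : ∀ (ns' : List String), (∀ n ∈ ns', gsReach course graph m0 n ∧ gsHb graph m0 f' n ∧ gsHb graph m0 graph.length n) →
            ∀ (mx : Int) (d' : PySem.Dict String Int), gsInv graph m0 d' →
            (gsGoAList graph f' ns' mx d').1 = gsSvList graph m0 graph.length ns' mx ∧
              gsInv graph m0 (gsGoAList graph f' ns' mx d').2 := by
          intro ns'
          induction ns' with
          | nil =>
            intro _ mx d' hi
            refine ⟨?_, ?_⟩
            · simp [gsGoAList, gsSvList]
            · simpa [gsGoAList] using hi
          | cons n rest ihl =>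
            intro hns' mx d' hi
            obtain ⟨hrn, hfn, hKn⟩ := hns' n (by simp)
            have hA := ih n d' hi hrn hfn
            have hv : (gsGoA graph f' n d').1 = gsSv graph m0 graph.length n := by
              rw [hA.1, gsVal]
              exact (gs_sv_stable graph.length (graph.length + 1) n hKn (by omega)).symm
            simp only [gsGoAList, gsSvList]
            rw [hv]
            exact ihl (fun n' hn' => hns' n' (by simp [hn'])) _ _ hA.2
        have hfold := hlist ns hns 0 d hinv
        have h1 : gsGoA graph (f' + 1) c d =
            (1 + (gsGoAList graph f' ns 0 d).1,
             (gsGoAList graph f' ns 0 d).2.insert c (1 + (gsGoAList graph f' ns 0 d).1)) := by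
          simp only [gsGoA, hd, hg]
        rw [h1]
        have hvalc : gsVal graph m0 c = 1 + gsSvList graph m0 graph.length ns 0 := by
          rw [gsVal, gs_sv_succ hm0, hg]
        refine ⟨by simp only [hfold.1, hvalc], ?_⟩
        obtain ⟨hnd, hi2, hi3⟩ := hfold.2
        refine ⟨PySem.Dict.nodup_keys_insert _ _ _ hnd, ?_, ?_⟩
        · intro x v hxm
          have hxc : x ≠ c := fun hxc => by rw [hxc, hm0] at hxm; cases hxm
          rw [PySem.Dict.get?_insert_of_ne _ _ hxc]
          exact hi2 x v hxm
        · intro x v hxm hxd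
          by_cases hxc : x = c
          · subst hxc
            rw [PySem.Dict.get?_insert_self] at hxd
            cases hxd
            rw [hvalc, hfold.1]
          · rw [PySem.Dict.get?_insert_of_ne _ _ hxc] at hxd
            exact hi3 x v hxm hxd

-- invariant for B's table (sound on the reachable part)
def gsInvB (course : String) (graph : List (String × List String)) (m0 : List (String × Int)) (d : PySem.Dict String Int) : Prop :=
  d.keys.Nodup ∧
  (∀ x v, (PySem.Dict.mk m0).get? x = some v → d.get? x = some v) ∧
  (∀ x v, (PySem.Dict.mk m0).get? x = none → gsReach course graph m0 x → d.get? x = some v → v = gsVal graph m0 x)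

theorem gs_bstep_get_mono {d : PySem.Dict String Int} {p : String × List String} {x : String} {v : Int}
    (h : d.get? x = some v) : (gsBStep d p).get? x = some v := by
  unfold gsBStep
  split
  · exact h
  · rename_i hc
    split
    · have hne : x ≠ p.1 := by
        intro hx
        subst hx
        rw [PySem.Dict.contains_eq_isSome_get?, h] at hc
        exact hc rfl
      rw [PySem.Dict.get?_insert_of_ne _ _ hne]
      exact h
    · exact h

theorem gs_bstep_contains_mono {d : PySem.Dict String Int} {p : String × List String} {x : String}
    (h : d.contains x = true) : (gsBStep d p).contains x = true := by
  rw [PySem.Dict.contains_eq_isSome_get?] at h ⊢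
  obtain ⟨v, hv⟩ := Option.isSome_iff_exists.mp h
  rw [gs_bstep_get_mono hv]
  rfl

theorem gs_B_inv_step {course : String} {graph : List (String × List String)} {m0 : List (String × Int)}
    (pre : Pre_get_semesters_required course graph m0) {d : PySem.Dict String Int} {p : String × List String}
    (hp : p ∈ graph) (h : gsInvB course graph m0 d) : gsInvB course graph m0 (gsBStep d p) := by
  obtain ⟨hnd, h2, h3⟩ := h
  unfold gsBStep
  split
  · exact ⟨hnd, h2, h3⟩
  · rename_i hcontains
    split
    · rename_i hall
      -- inserting p.1, which is not yet in d (and hence not memoised)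
      have hm0p : (PySem.Dict.mk m0).get? p.1 = none := by
        cases hm : (PySem.Dict.mk m0).get? p.1 with
        | none => rfl
        | some w =>
          have := h2 p.1 w hm
          rw [PySem.Dict.contains_eq_isSome_get?, this] at hcontains
          simp at hcontains
      refine ⟨PySem.Dict.nodup_keys_insert _ _ _ hnd, ?_, ?_⟩
      · intro x v hxm
        have hne : x ≠ p.1 := fun hx => by rw [hx, hm0p] at hxm; cases hxm
        rw [PySem.Dict.get?_insert_of_ne _ _ hne]
        exact h2 x v hxm
      · intro x v hxm hrx hxd
        by_cases hxc : x = p.1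
        · subst hxc
          rw [PySem.Dict.get?_insert_self] at hxd
          cases hxd
          -- the inserted value is the spec value of x
          have hg : (PySem.Dict.mk graph).get? p.1 = some p.2 := by
            have hmemi : (p.1, p.2) ∈ (PySem.Dict.mk graph).items := by simpa using hp
            exact PySem.Dict.get?_of_mem_items _ hmemi (by simpa [PySem.Dict.keys] using pre.1)
          have hEn : ∀ n ∈ p.2, gsE graph m0 p.1 n := by
            intro n hn
            unfold gsE gsSuccs
            rw [if_neg (by simp [(PySem.Dict.get?_eq_none_iff_contains _ p.1).mp hxm]), hg]
            simpa using hn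
          have hpt : ∀ n ∈ p.2, d.getD n 0 = gsSv graph m0 graph.length n := by
            intro n hn
            have hcn : d.contains n = true := by
              have := List.all_eq_true.mp hall n hn
              simpa using this
            rw [PySem.Dict.contains_eq_isSome_get?] at hcn
            obtain ⟨v, hv⟩ := Option.isSome_iff_exists.mp hcn
            rw [PySem.Dict.getD_eq_get?_getD, hv]
            cases hm2 : (PySem.Dict.mk m0).get? n with
            | some w =>
              have := h2 n w hm2
              rw [hv] at this
              cases this
              exact (gs_sv_memo hm2 _).symm
            | none =>
              have hvv := h3 n v hm2 (gs_reach_step hrx (hEn n hn)) hv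
              rw [hvv, gsVal]
              exact gs_sv_stable graph.length (graph.length + 1) n
                (gs_reach_hb_succ pre hrx (hEn n hn)) (by omega) |>.symm
          have hfold : ∀ (ns : List String) (mx : Int), (∀ n ∈ ns, d.getD n 0 = gsSv graph m0 graph.length n) →
              (ns.map (fun n => d.getD n 0)).foldl max mx = gsSvList graph m0 graph.length ns mx := by
            intro ns
            induction ns with
            | nil => intro mx _; simp [gsSvList]
            | cons n rest ihn =>
              intro mx hh
              simp only [List.map_cons, List.foldl_cons, gsSvList]
              rw [hh n (by simp), gs_max_if]
              exact ihn _ (fun n' hn' => hh n' (by simp [hn']))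
          rw [gsVal, gs_sv_succ hxm, hg]
          rw [hfold p.2 0 hpt]
        · rw [PySem.Dict.get?_insert_of_ne _ _ hxc] at hxd
          exact h3 x v hxm hrx hxd
    · exact ⟨hnd, h2, h3⟩

theorem gs_B_round_inv {course : String} {graph : List (String × List String)} {m0 : List (String × Int)}
    (pre : Pre_get_semesters_required course graph m0) {d : PySem.Dict String Int}
    (h : gsInvB course graph m0 d) : gsInvB course graph m0 (gsBRound graph d) := by
  have hgen : ∀ (gs : List (String × List String)) (d : PySem.Dict String Int), (∀ p ∈ gs, p ∈ graph) →
      gsInvB course graph m0 d → gsInvB course graph m0 (gs.foldl gsBStep d) := by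
    intro gs
    induction gs with
    | nil => intro d _ hd; exact hd
    | cons p rest ihg =>
      intro d hmem hd
      exact ihg _ (fun q hq => hmem q (by simp [hq])) (gs_B_inv_step pre (hmem p (by simp)) hd)
  exact hgen graph d (fun _ hq => hq) h

theorem gs_B_foldl_contains_mono {gs : List (String × List String)} {d : PySem.Dict String Int} {x : String}
    (h : d.contains x = true) : (gs.foldl gsBStep d).contains x = true := by
  induction gs generalizing d with
  | nil => exact h
  | cons p rest ihg => exact ihg (gs_bstep_contains_mono h)

theorem gs_B_process {c : String} {ns : List String} :
    ∀ (gs : List (String × List String)) (d : PySem.Dict String Int), (c, ns) ∈ gs →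
      (∀ n ∈ ns, d.contains n = true) → (gs.foldl gsBStep d).contains c = true := by
  intro gs
  induction gs with
  | nil => intro d h _; simp at h
  | cons p rest ihg =>
    intro d hmem hns
    rcases List.mem_cons.mp hmem with rfl | hmem'
    · simp only [List.foldl_cons]
      refine gs_B_foldl_contains_mono ?_
      unfold gsBStep
      split
      · assumption
      · rw [if_pos (List.all_eq_true.mpr (fun n hn => by simpa using hns n hn))]
        exact PySem.Dict.contains_insert_self _ _ _
    · simp only [List.foldl_cons]
      exact ihg _ hmem' (fun n hn => gs_bstep_contains_mono (hns n hn))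

theorem gs_B_rounds {course : String} {graph : List (String × List String)} {m0 : List (String × Int)}
    (pre : Pre_get_semesters_required course graph m0) :
    ∀ r : Nat,
      gsInvB course graph m0 ((List.range r).foldl (fun d _ => gsBRound graph d) (PySem.Dict.mk m0)) ∧
      (∀ c, gsReach course graph m0 c → gsHb graph m0 r c →
        ((List.range r).foldl (fun d _ => gsBRound graph d) (PySem.Dict.mk m0)).contains c = true) := by
  intro r
  induction r with
  | zero =>
    simp only [List.range_zero, List.foldl_nil]
    refine ⟨⟨by simpa [PySem.Dict.keys] using pre.2.1, fun x v h => h, fun x v h _ h' => ?_⟩, ?_⟩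
    · rw [h] at h'; cases h'
    · intro c _ hb
      exact absurd (hb [] (by simp)) (by omega)
  | succ r ihr =>
    have hstep : (List.range (r + 1)).foldl (fun d _ => gsBRound graph d) (PySem.Dict.mk m0) =
        gsBRound graph ((List.range r).foldl (fun d _ => gsBRound graph d) (PySem.Dict.mk m0)) := by
      rw [List.range_succ, List.foldl_append]
      rfl
    set dr := (List.range r).foldl (fun d _ => gsBRound graph d) (PySem.Dict.mk m0) with hdr
    refine ⟨by rw [hstep]; exact gs_B_round_inv pre ihr.1, ?_⟩
    intro c hr hb
    rw [hstep]
    by_cases hcr : dr.contains c = true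
    · exact gs_B_foldl_contains_mono hcr
    · have hm0c : (PySem.Dict.mk m0).get? c = none := by
        cases hm : (PySem.Dict.mk m0).get? c with
        | none => rfl
        | some w =>
          have := ihr.1.2.1 c w hm
          rw [PySem.Dict.contains_eq_isSome_get?, this] at hcr
          simp at hcr
      have hcR : c ∈ gsRClos graph m0 (graph.length + 1) [course] := gs_reach_mem_rclos pre hr
      have hclosed := pre.2.2.1 c hcR
      have hgc : (PySem.Dict.mk graph).contains c = true := by
        rcases hclosed with hmc | hgc
        · rw [PySem.Dict.contains_eq_isSome_get?, hm0c] at hmc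
          simp at hmc
        · exact hgc
      rw [PySem.Dict.contains_eq_isSome_get?] at hgc
      obtain ⟨ns, hg⟩ := Option.isSome_iff_exists.mp hgc
      have hmemi : (c, ns) ∈ graph := PySem.Dict.mem_items_of_get?_eq_some _ hg
      have hEn : ∀ n ∈ ns, gsE graph m0 c n := by
        intro n hn
        unfold gsE gsSuccs
        rw [if_neg (by simp [(PySem.Dict.get?_eq_none_iff_contains _ c).mp hm0c]), hg]
        simpa using hn
      have hns : ∀ n ∈ ns, dr.contains n = true := by
        intro n hn
        cases hm2 : (PySem.Dict.mk m0).get? n with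
        | some w =>
          rw [PySem.Dict.contains_eq_isSome_get?, ihr.1.2.1 n w hm2]
          rfl
        | none =>
          refine ihr.2 n (gs_reach_step hr (hEn n hn)) ?_
          intro l hl
          have := hb (n :: l) (List.isChain_cons_cons.mpr ⟨hEn n hn, hl⟩)
          simp at this
          omega
      exact gs_B_process graph dr hmemi hns

-- ===== VERDICT (by name: the statement is the Claim_ definition above) =====
theorem get_semesters_required_spec : Claim_equal_get_semesters_required := by
  intro course graph m0 _ pre
  unfold Spec_get_semesters_required get_semesters_required get_semesters_required_alt
  have hrc : gsReach course graph m0 course := Or.inl rfl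
  have hbc : gsHb graph m0 (graph.length + 1) course := gs_reach_hb pre hrc
  -- A computes the specification value
  have hInv0 : gsInv graph m0 (PySem.Dict.mk m0) := by
    refine ⟨by simpa [PySem.Dict.keys] using pre.2.1, fun x v h => h, fun x v h h' => ?_⟩
    rw [h] at h'; cases h'
  have hA := (gs_A_main pre (graph.length + 1) course (PySem.Dict.mk m0) hInv0 hrc hbc).1
  rw [hA]
  -- B computes the specification value
  have hB := gs_B_rounds pre (graph.length + 1)
  set df := (List.range (graph.length + 1)).foldl (fun d _ => gsBRound graph d) (PySem.Dict.mk m0) with hdf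
  have hcf : df.contains course = true := hB.2 course hrc hbc
  rw [PySem.Dict.contains_eq_isSome_get?] at hcf
  obtain ⟨v, hv⟩ := Option.isSome_iff_exists.mp hcf
  rw [PySem.Dict.getD_eq_get?_getD, hv]
  cases hm : (PySem.Dict.mk m0).get? course with
  | some w =>
    have h2 := hB.1.2.1 course w hm
    rw [hv] at h2
    injection h2 with h2
    simp only [Option.getD_some]
    rw [h2]
    exact gs_sv_memo hm _
  | none =>
    have := hB.1.2.2 course v hm hrc hv
    rw [this]
    rfl
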